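-- pv_equiv track=rewrite | github.com/yuna1212/algorithm | 프로그래머스/2021 Dev-Matching 웹 백엔드 개발자(상반기)/로또의 최고 순위와 최저 순위.py | count_ensured_and_zeros
-- ===== SOURCE A (Python) =====
-- def count_ensured_and_zeros(lottos, win_nums):
--     lottos.sort(); win_nums.sort();
--     i, j = 0, 0
--     counter = 0
--
--     while i < len(lottos) and lottos[i] == 0:
--         i += 1
--
--     zeros = i
--
--     while i < len(lottos):
--         while j < len(win_nums) and lottos[i] > win_nums[j]:
--             j += 1
--         if j >= len(win_nums):
--             break
--         if lottos[i] == win_nums[j]: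
--             counter += 1
--             j += 1
--         i += 1
--     return counter, zeros
-- ===== SOURCE B (Python) =====
-- def count_ensured_and_zeros(lottos, win_nums):
--     lottos.sort(); win_nums.sort()
--     zeros = next((k for k, v in enumerate(lottos) if v != 0), len(lottos))
--     wc = {}
--     for v in win_nums:
--         wc[v] = wc.get(v, 0) + 1
--     rc = {}
--     for v in lottos[zeros:]:
--         rc[v] = rc.get(v, 0) + 1
--     counter = sum(min(rc[v], wc.get(v, 0)) for v in rc)
--     return counter, zeros
-- ===== Notes on version B (the rewrite author's own statement) =====
-- stated objective: alternative
-- what changed: Replaces A's two-pointer merge over the two sorted lists with frequency dictionaries: count leading zeros by first non-zero index, build count dicts of the remaining lottos and of win_nums, and sum per-value minimum counts (multiset-intersection size); the in-place sorts are kept.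
import Mathlib
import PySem

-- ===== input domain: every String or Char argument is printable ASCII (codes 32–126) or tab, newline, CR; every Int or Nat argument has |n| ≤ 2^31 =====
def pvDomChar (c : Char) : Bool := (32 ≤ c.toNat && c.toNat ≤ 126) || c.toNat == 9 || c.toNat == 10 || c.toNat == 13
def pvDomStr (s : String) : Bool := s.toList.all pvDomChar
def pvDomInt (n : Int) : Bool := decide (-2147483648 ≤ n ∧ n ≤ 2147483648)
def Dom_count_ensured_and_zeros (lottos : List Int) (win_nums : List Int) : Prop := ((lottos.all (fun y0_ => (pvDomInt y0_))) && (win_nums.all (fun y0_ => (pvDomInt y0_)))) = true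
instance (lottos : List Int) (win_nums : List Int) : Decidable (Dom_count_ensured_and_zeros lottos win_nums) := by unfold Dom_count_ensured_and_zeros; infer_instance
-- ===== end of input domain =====

-- B replaces A's two-pointer merge over the two sorted lists by frequency dictionaries
-- (sum of per-value minimum counts); same return value. Both A and B sort lottos and
-- win_nums in place (observable mutation); the equivalence proved here is about the return value.

-- ===== PORT A =====

-- the first while loop: advance i while lottos[i] == 0
def pvCountLeadZeros : List Int → Nat
  | [] => 0
  | x :: xs => if x = 0 then pvCountLeadZeros xs + 1 else 0

-- the inner while loop: advance j while lottos[i] > win_nums[j]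
def pvDropLt (x : Int) : List Int → List Int
  | [] => []
  | y :: ys => if x > y then pvDropLt x ys else y :: ys

-- the outer while loop over the remaining suffixes of both sorted lists
def pvMergeCount : List Int → List Int → Int
  | [], _ => 0
  | x :: xs, ys =>
    match pvDropLt x ys with
    | [] => 0  -- j >= len(win_nums): break
    | y :: ys' => if x = y then 1 + pvMergeCount xs ys' else pvMergeCount xs (y :: ys')

def count_ensured_and_zeros (lottos : List Int) (win_nums : List Int) : Int × Int :=
  let ls := PySem.List.sorted lottos (fun x => x) false
  let ws := PySem.List.sorted win_nums (fun x => x) false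
  let zeros := pvCountLeadZeros ls
  (pvMergeCount (ls.drop zeros) ws, (zeros : Int))

-- ===== PORT B =====

def count_ensured_and_zeros_alt (lottos : List Int) (win_nums : List Int) : Int × Int :=
  let ls := PySem.List.sorted lottos (fun x => x) false
  let ws := PySem.List.sorted win_nums (fun x => x) false
  -- zeros = next((k for k, v in enumerate(ls) if v != 0), len(ls))
  let zeros := ls.findIdx (fun v => v != 0)
  -- wc / rc built by 'd[v] = d.get(v, 0) + 1' loops
  let wc := ws.foldl (fun d v => d.insert v (d.getD v 0 + 1)) PySem.Dict.empty
  let rc := (PySem.List.slice ls (some (zeros : Int)) none).foldl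
              (fun d v => d.insert v (d.getD v 0 + 1)) PySem.Dict.empty
  -- rc[v] for a key v of rc equals rc.getD v 0
  let counter := (rc.keys.map (fun v => min (rc.getD v 0) (wc.getD v 0))).sum
  (counter, (zeros : Int))

-- ===== PRECONDITION & SPEC =====
def Spec_count_ensured_and_zeros (lottos : List Int) (win_nums : List Int) (out : Int × Int) : Prop := out = count_ensured_and_zeros_alt lottos win_nums
instance (lottos : List Int) (win_nums : List Int) (out : Int × Int) : Decidable (Spec_count_ensured_and_zeros lottos win_nums out) := by unfold Spec_count_ensured_and_zeros; infer_instance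

-- ===== CLAIM (what is proved, stated in full; the proofs are below) =====
def Claim_equal_count_ensured_and_zeros : Prop := ∀ (lottos : List Int) (win_nums : List Int), Dom_count_ensured_and_zeros lottos win_nums → Spec_count_ensured_and_zeros lottos win_nums (count_ensured_and_zeros lottos win_nums)

-- ===== LEMMAS AND PROOFS =====

theorem pvCountLeadZeros_eq_findIdx (l : List Int) :
    pvCountLeadZeros l = l.findIdx (fun v => v != 0) := by
  induction l with
  | nil => rfl
  | cons x xs ih =>
    by_cases h : x = 0
    · simp [pvCountLeadZeros, List.findIdx_cons, h, ih]
    · have hb : (x != 0) = true := by simpa using h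
      simp [pvCountLeadZeros, List.findIdx_cons, h, hb]

theorem pvDropLt_decomp (x : Int) (ys : List Int) :
    ∃ pre, ys = pre ++ pvDropLt x ys ∧ ∀ z ∈ pre, z < x := by
  induction ys with
  | nil => exact ⟨[], by simp [pvDropLt]⟩
  | cons y ys ih =>
    by_cases h : x > y
    · obtain ⟨pre, hpre, hlt⟩ := ih
      refine ⟨y :: pre, ?_, ?_⟩
      · simp [pvDropLt, h, ← hpre]
      · intro z hz; rcases List.mem_cons.mp hz with rfl | hz
        · exact h
        · exact hlt z hz
    · exact ⟨[], by simp [pvDropLt, h]⟩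

theorem pvDropLt_sublist (x : Int) (ys : List Int) : (pvDropLt x ys).Sublist ys := by
  induction ys with
  | nil => simp [pvDropLt]
  | cons y ys ih =>
    by_cases h : x > y
    · simpa [pvDropLt, h] using ih.trans (List.sublist_cons_self y ys)
    · simp [pvDropLt, h]

theorem pvDropLt_head_le (x y : Int) (ys ys' : List Int) (h : pvDropLt x ys = y :: ys') :
    x ≤ y := by
  induction ys with
  | nil => simp [pvDropLt] at h
  | cons z zs ih =>
    by_cases hz : x > z
    · exact ih (by simpa [pvDropLt, hz] using h)
    · simp [pvDropLt, hz] at h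
      omega

-- dropping elements that are not in `as` from the front of `bs` does not change bagInter
theorem bagInter_append_left_notmem (as : List Int) :
    ∀ pre suf : List Int, (∀ z ∈ pre, z ∉ as) → as.bagInter (pre ++ suf) = as.bagInter suf := by
  induction as with
  | nil => intro pre suf _; simp
  | cons a as ih =>
    intro pre suf h
    have ha : a ∉ pre := fun hmem => (h a hmem) (List.mem_cons_self)
    have h' : ∀ z ∈ pre, z ∉ as := fun z hz hmem => (h z hz) (List.mem_cons_of_mem a hmem)
    by_cases hsuf : a ∈ suf
    · rw [List.cons_bagInter_of_pos as (by simp [hsuf]),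
          List.cons_bagInter_of_pos as hsuf,
          List.erase_append_right _ ha, ih pre (suf.erase a) h']
    · have : a ∉ pre ++ suf := by simp [ha, hsuf]
      rw [List.cons_bagInter_of_neg as this, List.cons_bagInter_of_neg as hsuf, ih pre suf h']

-- the two-pointer merge of A counts the multiset intersection of the two sorted lists
theorem pvMergeCount_eq_bagInter (xs : List Int) :
    ∀ ys : List Int, xs.Pairwise (· ≤ ·) → ys.Pairwise (· ≤ ·) →
      pvMergeCount xs ys = ((xs.bagInter ys).length : Int) := by
  induction xs with
  | nil => intro ys _ _; simp [pvMergeCount]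
  | cons x xs ih =>
    intro ys hx hy
    have hxxs : ∀ v ∈ xs, x ≤ v := (List.pairwise_cons.mp hx).1
    have hxs : xs.Pairwise (· ≤ ·) := (List.pairwise_cons.mp hx).2
    obtain ⟨pre, hdec, hlt⟩ := pvDropLt_decomp x ys
    have hpre : ∀ z ∈ pre, z ∉ x :: xs := by
      intro z hz hmem
      have hzx := hlt z hz
      rcases List.mem_cons.mp hmem with rfl | hmem
      · omega
      · have := hxxs z hmem; omega
    have hbag : (x :: xs).bagInter ys = (x :: xs).bagInter (pvDropLt x ys) := by
      conv_lhs => rw [hdec]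
      exact bagInter_append_left_notmem _ pre _ hpre
    have hds : (pvDropLt x ys).Pairwise (· ≤ ·) := hy.sublist (pvDropLt_sublist x ys)
    cases hem : pvDropLt x ys with
    | nil => simp [pvMergeCount, hem, hbag]
    | cons y ys' =>
      have hxy : x ≤ y := pvDropLt_head_le x y ys ys' hem
      have hys' : ys'.Pairwise (· ≤ ·) := (List.pairwise_cons.mp (hem ▸ hds)).2
      have hstep : pvMergeCount (x :: xs) ys =
          (if x = y then 1 + pvMergeCount xs ys' else pvMergeCount xs (y :: ys')) := by
        simp only [pvMergeCount, hem]
      rw [hstep, hbag, hem]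
      by_cases hxeq : x = y
      · have hbi : (x :: xs).bagInter (y :: ys') = x :: xs.bagInter ys' := by
          rw [List.cons_bagInter_of_pos xs (by simp [hxeq])]
          congr 1
          simp [hxeq, List.erase_cons_head]
        rw [if_pos hxeq, hbi, List.length_cons, ih ys' hxs hys']
        push_cast; ring
      · have hxlt : x < y := lt_of_le_of_ne hxy hxeq
        have hyall : ∀ v ∈ ys', y ≤ v := (List.pairwise_cons.mp (hem ▸ hds)).1
        have hnot : x ∉ y :: ys' := by
          intro hmem
          rcases List.mem_cons.mp hmem with rfl | hmem
          · omega
          · have := hyall x hmem; omega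
        have hbi : (x :: xs).bagInter (y :: ys') = xs.bagInter (y :: ys') := List.cons_bagInter_of_neg xs hnot
        rw [if_neg hxeq, hbi]
        exact ih (y :: ys') hxs (hem ▸ hds)

-- summing min-counts over any duplicate-free enumeration of the values of `as` counts the multiset intersection
theorem sum_min_counts_eq_bagInter (L as bs : List Int) (hnd : L.Nodup)
    (hmem : ∀ v, v ∈ L ↔ v ∈ as) :
    (L.map (fun v => min (as.count v) (bs.count v))).sum = (as.bagInter bs).length := by
  rw [← List.sum_toFinset _ hnd]
  have hfs : L.toFinset = as.toFinset := by
    ext v; simp [List.mem_toFinset, hmem]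
  rw [hfs]
  have h1 : ∀ v ∈ as.toFinset, min (as.count v) (bs.count v) = (as.bagInter bs).count v := by
    intro v _; rw [List.count_bagInter]
  have hsub : (as.bagInter bs).toFinset ⊆ as.toFinset := by
    intro v hv
    simp only [List.mem_toFinset] at *
    exact (List.mem_bagInter.mp hv).1
  have hzero : ∀ v ∈ as.toFinset, v ∉ (as.bagInter bs).toFinset → (as.bagInter bs).count v = 0 := by
    intro v _ hv
    simp only [List.mem_toFinset] at hv
    exact List.count_eq_zero.mpr hv
  calc ∑ v ∈ as.toFinset, min (as.count v) (bs.count v)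
      = ∑ v ∈ as.toFinset, (as.bagInter bs).count v := Finset.sum_congr rfl h1
    _ = ∑ v ∈ (as.bagInter bs).toFinset, (as.bagInter bs).count v :=
        (Finset.sum_subset hsub hzero).symm
    _ = (as.bagInter bs).length := by
        simpa using Multiset.toFinset_sum_count_eq (↑(as.bagInter bs) : Multiset Int)

-- ===== VERDICT (by name: the statement is the Claim_ definition above) =====
theorem count_ensured_and_zeros_spec : Claim_equal_count_ensured_and_zeros := by
  intro lottos win_nums _
  unfold Spec_count_ensured_and_zeros count_ensured_and_zeros count_ensured_and_zeros_alt
  simp only []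
  set ls := PySem.List.sorted lottos (fun x => x) false with hls
  set ws := PySem.List.sorted win_nums (fun x => x) false with hws
  rw [pvCountLeadZeros_eq_findIdx]
  set z := ls.findIdx (fun v => v != 0) with hz
  rw [PySem.List.slice_from_natCast]
  rw [PySem.Dict.foldl_insert_getD_add_one_eq_counter,
      PySem.Dict.foldl_insert_getD_add_one_eq_counter]
  set rest := ls.drop z with hrest
  refine Prod.ext ?_ rfl
  show pvMergeCount rest ws = _
  have hlp : ls.Pairwise (· ≤ ·) := by
    simpa using PySem.List.sorted_pairwise lottos (fun x => x)
  have hwp : ws.Pairwise (· ≤ ·) := by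
    simpa using PySem.List.sorted_pairwise win_nums (fun x => x)
  have hrp : rest.Pairwise (· ≤ ·) := hlp.sublist (List.drop_sublist z ls)
  rw [pvMergeCount_eq_bagInter rest ws hrp hwp]
  simp only [PySem.Dict.keys_counter, PySem.Dict.getD_counter]
  have hcast : ((PySem.Set.ofList rest).map
      (fun v => min ((rest.count v : Int)) ((ws.count v : Int)))).sum
      = (((PySem.Set.ofList rest).map (fun v => min (rest.count v) (ws.count v))).sum : Int) := by
    induction (PySem.Set.ofList rest) with
    | nil => simp
    | cons a l ihl =>
      simp only [List.map_cons, List.sum_cons, ihl]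
      push_cast
      ring
  rw [hcast, sum_min_counts_eq_bagInter (PySem.Set.ofList rest) rest ws
      (PySem.Set.nodup_ofList rest) (fun v => PySem.Set.mem_ofList rest v)]
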